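-- pv_equiv track=rewrite | github.com/Vrjob/Top-Interview-150 | Davi.py | davi
-- ===== SOURCE A (Python) =====
-- def davi(str):
--     alph = ["a", "b", "c", "d", "e", "f", "g", "h", "i", "j", "k", "l", "m", "n", "o", "p", "q", "r", "s", "t", "u", "v", "w", "x", "y", "z"]
--     raw_char_count = [0] * 26
--     str_char_count = []
--     response = []
--
--     for char in str:
--         raw_char_count[alph.index(char)] += 1
--         str_char_count.append(raw_char_count[alph.index(char)])
--
--     max_app = max(str_char_count)
--
--     for i in range(len(str_char_count)):
--         if str_char_count[i] == max_app:
--             response.append(str[i])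
--
--     return ''.join(response)
-- ===== SOURCE B (Python) =====
-- def davi(str):
--     counts = {}
--     last = {}
--     for i, ch in enumerate(str):
--         counts[ch] = counts.get(ch, 0) + 1
--         last[ch] = i
--     m = max(counts.values())
--     winners = [c for c in counts if counts[c] == m]
--     return ''.join(sorted(winners, key=lambda c: last[c]))
-- ===== Notes on version B (the rewrite author's own statement) =====
-- stated objective: faster
-- what changed: Replaces A's per-position running-count list (a 26-element alphabet scan via list.index twice per character, then a global max and a positional filter pass) with a single counting pass building frequency and last-occurrence dicts, then selecting the characters of maximal total count and sorting them by last occurrence.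
-- crash fix: On nonempty strings containing a character outside lowercase a-z, A raises ValueError from list.index; B returns the most-frequent characters of the whole string ordered by last occurrence. — e.g. on davi("aA"): A raises ValueError, B returns "aA"
import Mathlib
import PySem

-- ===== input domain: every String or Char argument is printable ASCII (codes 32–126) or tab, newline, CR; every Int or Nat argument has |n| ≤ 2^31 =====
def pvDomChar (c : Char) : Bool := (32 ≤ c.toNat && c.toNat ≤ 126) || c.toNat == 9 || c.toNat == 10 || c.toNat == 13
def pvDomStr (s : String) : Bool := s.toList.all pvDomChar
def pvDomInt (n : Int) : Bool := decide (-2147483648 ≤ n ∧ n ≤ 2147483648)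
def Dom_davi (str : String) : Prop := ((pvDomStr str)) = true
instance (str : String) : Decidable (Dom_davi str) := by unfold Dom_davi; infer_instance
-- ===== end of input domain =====

-- B replaces A's per-position running-count list (with a 26-element scan per character)
-- by a single counting pass (frequency + last-occurrence dicts) and a sort of the winners;
-- equal return values on Pre_ (nonempty, all lowercase a-z); measurably faster by a constant factor.

-- ===== PORT A =====
def aAlph : List Char :=
  ['a','b','c','d','e','f','g','h','i','j','k','l','m','n','o','p','q','r','s','t','u','v','w','x','y','z']

def davi (str : String) : String :=
  let s := str.toList
  let p := s.foldl (fun (st : List Int × List Int) char =>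
      -- alph.index(char): ValueError when char ∉ aAlph — excluded by Pre_davi
      let i := (PySem.List.index? aAlph char).getD 0
      let raw := st.1.modify i (· + 1)
      (raw, st.2 ++ [PySem.List.pyGetD raw (i : Int) 0]))
    (List.replicate 26 (0 : Int), ([] : List Int))
  let scc := p.2
  -- max(str_char_count): ValueError on the empty string — excluded by Pre_davi
  let maxApp := (PySem.List.max? scc (fun v => v)).getD 0
  let response := (PySem.List.pyRange 0 (scc.length : Int) 1).foldl
      (fun acc i => if PySem.List.pyGetD scc i 0 == maxApp then acc ++ [PySem.List.pyGetD s i ' '] else acc) []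
  String.mk response

-- ===== PORT B =====
def davi_alt (str : String) : String :=
  let s := str.toList
  let p := (PySem.List.enumerate s).foldl
      (fun (st : PySem.Dict Char Int × PySem.Dict Char Int) e =>
        (st.1.modify e.2 0 (· + 1), st.2.insert e.2 e.1))
      (PySem.Dict.empty, PySem.Dict.empty)
  let counts := p.1
  let last := p.2
  -- max(counts.values()): ValueError on the empty string — excluded by Pre_davi
  let m := (PySem.List.max? counts.values (fun v => v)).getD 0
  let winners := counts.keys.filter (fun c => counts.getD c 0 == m)
  String.mk (PySem.List.sorted winners (fun c => last.getD c 0) false)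

-- ===== PRECONDITION & SPEC =====
-- Pre_ excludes exactly the inputs where A raises ValueError: the empty string
-- (max() of an empty list) and strings with a character outside lowercase a-z (list.index fails).
def Pre_davi (str : String) : Prop :=
  str.toList ≠ [] ∧ (str.toList.all (fun c => 'a' ≤ c && c ≤ 'z')) = true
instance (str : String) : Decidable (Pre_davi str) := by unfold Pre_davi; infer_instance

def pvWitness_davi : String := "aabcb"

-- A raises ValueError on nonempty strings containing a character outside lowercase a-z;
-- B returns the same most-frequent-character selection computed over all characters.
def Raises_davi (str : String) : Prop :=
  str.toList ≠ [] ∧ ¬ ((str.toList.all (fun c => 'a' ≤ c && c ≤ 'z')) = true)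
instance (str : String) : Decidable (Raises_davi str) := by unfold Raises_davi; infer_instance
def pvRaiseWitness_davi : String := "aA"
def pvRaiseWitnessOut_davi : String := "aA"

def Spec_davi (str : String) (out : String) : Prop := out = davi_alt str
instance (str : String) (out : String) : Decidable (Spec_davi str out) := by unfold Spec_davi; infer_instance

-- ===== CLAIM (what is proved, stated in full; the proofs are below) =====
def Claim_equal_davi : Prop := ∀ (str : String), Dom_davi str → Pre_davi str → Spec_davi str (davi str)
def Claim_raises_davi : Prop := (∀ (str : String), Dom_davi str → Raises_davi str → ¬ Pre_davi str) ∧ (Dom_davi (pvRaiseWitness_davi) ∧ Raises_davi (pvRaiseWitness_davi) ∧ davi_alt (pvRaiseWitness_davi) = pvRaiseWitnessOut_davi)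

-- ===== LEMMAS AND PROOFS =====

lemma mem_aAlph (c : Char) : c ∈ aAlph ↔ ('a' ≤ c ∧ c ≤ 'z') := by
  constructor
  · intro h
    fin_cases h <;> constructor <;> decide
  · rintro ⟨h1, h2⟩
    have hv1 : 97 ≤ c.toNat := h1
    have hv2 : c.toNat ≤ 122 := h2
    have hc : Char.ofNat c.toNat = c := Char.ofNat_toNat c
    interval_cases h : c.toNat <;> (rw [← hc]; decide)

def runsOf : List Char → List Char → List Int
  | _, [] => []
  | pre, c :: t => ((pre.count c : Int) + 1) :: runsOf (pre ++ [c]) t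
def lastPos : List Char → Char → Nat
  | [], _ => 0
  | _ :: xs, c => if c ∈ xs then lastPos xs c + 1 else 0

lemma length_runsOf (pre t : List Char) : (runsOf pre t).length = t.length := by
  induction t generalizing pre with
  | nil => rfl
  | cons c t ih => simp [runsOf, ih]

lemma runsOf_getElem (t : List Char) : ∀ (pre : List Char) (i : Nat) (h : i < t.length),
    (runsOf pre t)[i]'(by rw [length_runsOf]; exact h)
      = ((pre.count (t[i]) + (t.take (i+1)).count (t[i]) : Nat) : Int) := by
  induction t with
  | nil => intro pre i h; simp at h
  | cons c t ih =>
    intro pre i h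
    cases i with
    | zero => simp [runsOf]
    | succ i =>
      have h' : i < t.length := by simpa using h
      have := ih (pre ++ [c]) i h'
      simp only [runsOf, List.getElem_cons_succ, this]
      simp [List.count_append]
      by_cases hc : c = t[i] <;> simp [hc] <;> omega

lemma lastPos_spec (t : List Char) (c : Char) (h : c ∈ t) :
    ∃ (hl : lastPos t c < t.length), t[lastPos t c] = c ∧ c ∉ t.drop (lastPos t c + 1) := by
  induction t with
  | nil => simp at h
  | cons x xs ih =>
    by_cases hm : c ∈ xs
    · obtain ⟨hl, h1, h2⟩ := ih hm
      refine ⟨?_, ?_, ?_⟩ <;> simp [lastPos, hm, hl, h1, h2]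
    · have hx : c = x := by rcases List.mem_cons.mp h with h' | h'; exact h'; exact absurd h' hm
      exact ⟨by simp [lastPos, hm], by simp [lastPos, hm, hx.symm], by simpa [lastPos, hm] using hm⟩

lemma lastPos_unique (t : List Char) (c : Char) : ∀ (i : Nat) (hi : i < t.length),
    t[i] = c → c ∉ t.drop (i + 1) → lastPos t c = i := by
  induction t with
  | nil => intro i hi; simp at hi
  | cons x xs ih =>
    intro i hi he hd
    cases i with
    | zero =>
      simp at he hd
      simp [lastPos, hd]
    | succ i =>
      have hi' : i < xs.length := by simpa using hi
      have he' : xs[i] = c := by simpa using he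
      have hd' : c ∉ xs.drop (i + 1) := by simpa using hd
      have hm : c ∈ xs := by rw [← he']; exact List.getElem_mem _
      simp [lastPos, hm, ih i hi' he' hd']

def rawOf (pre : List Char) : List Int := aAlph.map (fun ch => (pre.count ch : Int))

lemma aAlph_nodup : aAlph.Nodup := by decide

lemma rawOf_step (pre : List Char) (c : Char) (j : Nat) (hj : PySem.List.index? aAlph c = some j) :
    (rawOf pre).modify j (· + 1) = rawOf (pre ++ [c]) := by
  obtain ⟨hjl, hc, -⟩ := PySem.List.getElem_of_index?_eq_some hj
  apply List.ext_getElem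
  · simp [rawOf]
  · intro k h1 h2
    have hk : k < aAlph.length := by simpa [rawOf] using h2
    rw [List.getElem_modify]
    simp only [rawOf, List.getElem_map, List.count_append]
    by_cases hkj : j = k
    · subst hkj
      simp [hc, List.count_singleton]
    · have : aAlph[k] ≠ c := by
        intro hh
        exact hkj ((List.Nodup.getElem_inj_iff aAlph_nodup).mp (hc.trans hh.symm))
      simp [List.count_singleton, hkj]
      exact fun hh => this hh.symm

lemma rawOf_get (pre : List Char) (c : Char) (j : Nat) (hj : PySem.List.index? aAlph c = some j) :
    PySem.List.pyGetD (rawOf pre) (j : Int) 0 = (pre.count c : Int) := by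
  obtain ⟨hjl, hc, -⟩ := PySem.List.getElem_of_index?_eq_some hj
  rw [PySem.List.pyGetD_natCast]
  have hl : j < (rawOf pre).length := by simpa [rawOf] using hjl
  rw [List.getD_eq_getElem _ _ hl]
  simp [rawOf, hc]

lemma foldA (t : List Char) : ∀ (pre : List Char) (acc : List Int),
    (∀ c ∈ t, c ∈ aAlph) →
    t.foldl (fun (st : List Int × List Int) char =>
      let i := (PySem.List.index? aAlph char).getD 0
      let raw := st.1.modify i (· + 1)
      (raw, st.2 ++ [PySem.List.pyGetD raw (i : Int) 0])) (rawOf pre, acc)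
    = (rawOf (pre ++ t), acc ++ runsOf pre t) := by
  induction t with
  | nil => intro pre acc _; simp [runsOf]
  | cons c t ih =>
    intro pre acc h
    have hc : c ∈ aAlph := h c (by simp)
    obtain ⟨j, hj⟩ := Option.isSome_iff_exists.mp ((PySem.List.index?_isSome_iff _ _).mpr hc)
    simp only [List.foldl_cons, hj, Option.getD_some]
    rw [rawOf_step pre c j hj, rawOf_get (pre ++ [c]) c j hj]
    rw [ih (pre ++ [c]) (acc ++ [((pre ++ [c]).count c : Int)]) (fun d hd => h d (by simp [hd]))]
    simp [runsOf, List.count_append]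

lemma getD_foldl_insert_snd_fst (l : List (Int × Char)) : ∀ (d : PySem.Dict Char Int) (c : Char) (v : Int),
    c ∉ l.map (·.2) →
    (l.foldl (fun d e => d.insert e.2 e.1) d).getD c v = d.getD c v := by
  induction l with
  | nil => intro d c v _; rfl
  | cons e l ih =>
    intro d c v h
    simp only [List.map_cons, List.mem_cons, not_or] at h
    rw [List.foldl_cons, ih _ _ _ h.2, PySem.Dict.getD_insert_of_ne _ _ _ h.1]

lemma lastD (t : List Char) : ∀ (s0 : Int) (d : PySem.Dict Char Int) (c : Char) (v : Int),
    ((PySem.List.enumerate t s0).foldl (fun d e => d.insert e.2 e.1) d).getD c v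
      = if c ∈ t then s0 + (lastPos t c : Int) else d.getD c v := by
  induction t with
  | nil => intro s0 d c v; simp [PySem.List.enumerate]
  | cons x xs ih =>
    intro s0 d c v
    rw [PySem.List.enumerate_cons, List.foldl_cons]
    by_cases hm : c ∈ xs
    · rw [ih (s0+1) _ c v]
      simp [hm, lastPos]
      push_cast
      ring
    · have hnm : c ∉ (PySem.List.enumerate xs (s0+1)).map (·.2) := by
        rw [PySem.List.map_snd_enumerate]; exact hm
      rw [getD_foldl_insert_snd_fst _ _ _ _ hnm]
      by_cases hx : c = x
      · subst hx
        simp [lastPos, hm, PySem.Dict.getD_insert_self]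
      · rw [PySem.Dict.getD_insert_of_ne _ _ _ hx]
        simp [hm, hx]

lemma lastIs (s : List Char) (m : Char) (hmax : ∀ d ∈ s, s.count d ≤ s.count m)
    (i : Nat) (hi : i < s.length)
    (hq : ((s.take (i+1)).count (s[i]) : Int) = (s.count m : Int)) :
    lastPos s (s[i]) = i ∧ s.count (s[i]) = s.count m := by
  have hq' : (s.take (i+1)).count (s[i]) = s.count m := by exact_mod_cast hq
  have h1 : (s.take (i+1)).count (s[i]) ≤ s.count (s[i]) :=
    (List.take_sublist _ _).count_le _
  have h2 : s.count (s[i]) ≤ s.count m := hmax _ (List.getElem_mem hi)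
  have hc : s.count (s[i]) = s.count m := by omega
  have hsplit : ∀ c : Char, s.count c = (s.take (i+1)).count c + (s.drop (i+1)).count c := by
    intro c
    conv_lhs => rw [← List.take_append_drop (i+1) s]
    rw [List.count_append]
  have hsplit := hsplit (s[i])
  have hd0 : (s.drop (i+1)).count (s[i]) = 0 := by omega
  have hd : (s[i]) ∉ s.drop (i+1) := List.count_eq_zero.mp hd0
  exact ⟨lastPos_unique s _ i hi rfl hd, hc⟩

lemma lastIs' (s : List Char) (m c : Char) (hc : c ∈ s) (hcount : s.count c = s.count m) :
    ∃ (hl : lastPos s c < s.length), s[lastPos s c] = c ∧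
      ((s.take (lastPos s c + 1)).count (s[lastPos s c]) : Int) = (s.count m : Int) := by
  obtain ⟨hl, h1, h2⟩ := lastPos_spec s c hc
  refine ⟨hl, h1, ?_⟩
  have hsplit : s.count c = (s.take (lastPos s c + 1)).count c + (s.drop (lastPos s c + 1)).count c := by
    conv_lhs => rw [← List.take_append_drop (lastPos s c + 1) s]
    rw [List.count_append]
  have hd0 : (s.drop (lastPos s c + 1)).count c = 0 := List.count_eq_zero.mpr h2
  rw [h1]
  exact_mod_cast by omega


lemma core (s : List Char) (hne : s ≠ [])
    (hmem : ∀ c ∈ s, c ∈ aAlph) :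
    (let p := s.foldl (fun (st : List Int × List Int) char =>
        let i := (PySem.List.index? aAlph char).getD 0
        let raw := st.1.modify i (· + 1)
        (raw, st.2 ++ [PySem.List.pyGetD raw (i : Int) 0]))
      (List.replicate 26 (0 : Int), ([] : List Int))
     let scc := p.2
     let maxApp := (PySem.List.max? scc (fun v => v)).getD 0
     (PySem.List.pyRange 0 (scc.length : Int) 1).foldl
      (fun acc i => if PySem.List.pyGetD scc i 0 == maxApp then acc ++ [PySem.List.pyGetD s i ' '] else acc) [])
    = (let p := (PySem.List.enumerate s).foldl
        (fun (st : PySem.Dict Char Int × PySem.Dict Char Int) e =>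
          (st.1.modify e.2 0 (· + 1), st.2.insert e.2 e.1))
        (PySem.Dict.empty, PySem.Dict.empty)
       let counts := p.1
       let last := p.2
       let m := (PySem.List.max? counts.values (fun v => v)).getD 0
       let winners := counts.keys.filter (fun c => counts.getD c 0 == m)
       PySem.List.sorted winners (fun c => last.getD c 0) false) := by
  -- modal character
  obtain ⟨m, hmv⟩ : ∃ m, PySem.List.max? s (fun c => (s.count c : Int)) = some m := by
    rcases h : PySem.List.max? s (fun c => (s.count c : Int)) with _ | m
    · exact absurd ((PySem.List.max?_eq_none_iff _ _).mp h) hne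
    · exact ⟨m, rfl⟩
  have hmmem : m ∈ s := PySem.List.max?_mem hmv
  have hmax : ∀ d ∈ s, s.count d ≤ s.count m := by
    intro d hd
    exact_mod_cast PySem.List.max?_isMax hmv d hd
  simp only []
  rw [show (List.replicate 26 (0 : Int)) = rawOf [] by decide]
  rw [foldA s [] [] hmem]
  simp only [List.nil_append]
  set scc := runsOf [] s with hscc
  have hlen : scc.length = s.length := length_runsOf [] s
  -- A's maxApp equals (s.count m : Int)
  have hMinscc : ((s.count m : Int)) ∈ scc := by
    obtain ⟨hl, h1, h2⟩ := lastIs' s m m hmmem rfl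
    have := runsOf_getElem s [] (lastPos s m) hl
    rw [List.mem_iff_getElem]
    refine ⟨lastPos s m, by rw [hlen]; exact hl, ?_⟩
    rw [this]
    simpa using h2
  have hub : ∀ v ∈ scc, v ≤ (s.count m : Int) := by
    intro v hv
    obtain ⟨i, hi, hveq⟩ := List.mem_iff_getElem.mp hv
    have hi' : i < s.length := by rwa [hlen] at hi
    rw [runsOf_getElem s [] i hi'] at hveq
    have h1 : (s.take (i+1)).count (s[i]) ≤ s.count (s[i]) :=
      (List.take_sublist _ _).count_le _
    have h2 : s.count (s[i]) ≤ s.count m := hmax _ (List.getElem_mem hi')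
    rw [← hveq]
    simp only [List.count_nil]
    exact_mod_cast by omega
  have hMA : (PySem.List.max? scc (fun v => v)).getD 0 = (s.count m : Int) := by
    rcases hv : PySem.List.max? scc (fun v => v) with _ | v
    · exact absurd ((PySem.List.max?_eq_none_iff _ _).mp hv)
        (List.ne_nil_of_mem hMinscc)
    · simp only [Option.getD_some]
      exact le_antisymm (hub v (PySem.List.max?_mem hv))
        (PySem.List.max?_isMax hv _ hMinscc)
  simp only [hMA]
  rw [PySem.List.pyRange_zero_natCast scc.length, List.foldl_map, PySem.List.foldl_append_if]
  rw [List.nil_append, hlen]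
  -- name the A-side predicate and element map
  set P : Nat → Bool := fun k => (PySem.List.pyGetD scc (k : Int) 0 == ((s.count m : Nat) : Int)) with hP
  set F : Nat → Char := fun k => PySem.List.pyGetD s (k : Int) ' ' with hF
  have hFi : ∀ i, i < s.length → ∀ (hi : i < s.length), F i = s[i] := by
    intro i hi hi'
    rw [hF]
    simp only []
    rw [PySem.List.pyGetD_natCast, List.getD_eq_getElem _ _ hi]
  have hPi : ∀ i (hi : i < s.length),
      (P i = true ↔ ((s.take (i+1)).count (s[i]) : Int) = ((s.count m : Nat) : Int)) := by
    intro i hi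
    rw [hP]
    simp only [beq_iff_eq]
    have hi2 : i < scc.length := by rwa [hlen]
    rw [PySem.List.pyGetD_natCast, List.getD_eq_getElem _ _ hi2]
    rw [runsOf_getElem s [] i hi]
    simp
  -- B side: split the product fold
  rw [PySem.List.foldl_prod_mk (f := fun (d : PySem.Dict Char Int) (e : Int × Char) => d.modify e.2 0 (· + 1))
      (g := fun (d : PySem.Dict Char Int) (e : Int × Char) => d.insert e.2 e.1)]
  simp only []
  have hcounts : (PySem.List.enumerate s).foldl
      (fun (d : PySem.Dict Char Int) (e : Int × Char) => d.modify e.2 0 (· + 1)) PySem.Dict.empty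
      = PySem.Dict.counter s := by
    rw [PySem.Dict.counter_eq_foldl]
    conv_rhs => rw [← PySem.List.map_snd_enumerate s 0]
    rw [List.foldl_map]
  rw [hcounts]
  -- B's maximum equals (s.count m : Int)
  have hnodup := PySem.Dict.nodup_keys_counter s
  have hvals : (PySem.Dict.counter s).values = (PySem.Dict.counter s).items.map (·.2) := rfl
  have hMvals : ((s.count m : Nat) : Int) ∈ (PySem.Dict.counter s).values := by
    have hcont : (PySem.Dict.counter s).contains m = true := by
      rw [PySem.Dict.contains_counter]
      simp [hmmem]
    rw [PySem.Dict.contains_eq_isSome_get?] at hcont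
    obtain ⟨w, hw⟩ := Option.isSome_iff_exists.mp hcont
    have hit := PySem.Dict.mem_items_of_get?_eq_some _ hw
    have hwv : w = ((s.count m : Nat) : Int) := by
      have := PySem.Dict.getD_of_mem_items _ hit hnodup 0
      rw [PySem.Dict.getD_counter] at this
      exact this.symm
    rw [hvals]
    exact List.mem_map.mpr ⟨(m, w), hit, hwv⟩
  have hvub : ∀ v ∈ (PySem.Dict.counter s).values, v ≤ ((s.count m : Nat) : Int) := by
    intro v hv
    rw [hvals] at hv
    obtain ⟨⟨k, w⟩, hkw, hw2⟩ := List.mem_map.mp hv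
    have hgd := PySem.Dict.getD_of_mem_items _ hkw hnodup 0
    rw [PySem.Dict.getD_counter] at hgd
    have hks : k ∈ s := by
      have := PySem.Dict.mem_keys_of_mem_items _ hkw
      rw [PySem.Dict.keys_counter] at this
      exact (PySem.Set.mem_ofList _ _).mp this
    have := hmax k hks
    have hvw : v = w := by simpa using hw2.symm
    rw [hvw, ← hgd]
    exact_mod_cast this
  have hMB : (PySem.List.max? (PySem.Dict.counter s).values (fun v => v)).getD 0
      = ((s.count m : Nat) : Int) := by
    rcases hv : PySem.List.max? (PySem.Dict.counter s).values (fun v => v) with _ | v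
    · exact absurd ((PySem.List.max?_eq_none_iff _ _).mp hv) (List.ne_nil_of_mem hMvals)
    · simp only [Option.getD_some]
      exact le_antisymm (hvub v (PySem.List.max?_mem hv))
        (PySem.List.max?_isMax hv _ hMvals)
  rw [hMB, PySem.Dict.keys_counter]
  simp only [lastD]
  -- characterize membership in A's response
  have hmemW : ∀ c, c ∈ List.map F (List.filter P (List.range s.length)) ↔
      (c ∈ s ∧ s.count c = s.count m) := by
    intro c
    constructor
    · intro hc
      obtain ⟨i, hif, hFi'⟩ := List.mem_map.mp hc
      obtain ⟨hir, hPi'⟩ := List.mem_filter.mp hif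
      have hi : i < s.length := List.mem_range.mp hir
      have hlc := lastIs s m hmax i hi ((hPi i hi).mp hPi')
      rw [← hFi', hFi i hi hi]
      exact ⟨List.getElem_mem hi, hlc.2⟩
    · rintro ⟨hcs, hcc⟩
      obtain ⟨hl, h1, h2⟩ := lastIs' s m c hcs hcc
      refine List.mem_map.mpr ⟨lastPos s c, List.mem_filter.mpr ⟨List.mem_range.mpr hl, ?_⟩, ?_⟩
      · exact (hPi _ hl).mpr h2
      · rw [hFi _ hl hl, h1]
  -- key values on elements of A's response
  have hkeyF : ∀ i ∈ List.filter P (List.range s.length),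
      (fun c => if c ∈ s then 0 + ((lastPos s c : Nat) : Int) else PySem.Dict.empty.getD c 0) (F i)
        = (i : Int) := by
    intro i hif
    obtain ⟨hir, hPi'⟩ := List.mem_filter.mp hif
    have hi : i < s.length := List.mem_range.mp hir
    have hlc := lastIs s m hmax i hi ((hPi i hi).mp hPi')
    rw [hFi i hi hi]
    simp [List.getElem_mem hi, hlc.1]
  have hpairW : (List.map F (List.filter P (List.range s.length))).Pairwise
      (fun a b => (fun c => if c ∈ s then 0 + ((lastPos s c : Nat) : Int) else PySem.Dict.empty.getD c 0) a
        < (fun c => if c ∈ s then 0 + ((lastPos s c : Nat) : Int) else PySem.Dict.empty.getD c 0) b) := by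
    rw [List.pairwise_map]
    refine List.Pairwise.imp_of_mem ?_ ((List.pairwise_lt_range).filter P)
    intro a b ha hb hab
    rw [hkeyF a ha, hkeyF b hb]
    exact_mod_cast hab
  have hnodW : (List.map F (List.filter P (List.range s.length))).Nodup :=
    hpairW.imp (fun h => by intro he; rw [he] at h; exact lt_irrefl _ h)
  have hnodwin : ((PySem.Set.ofList s).filter
      (fun c => (PySem.Dict.counter s).getD c 0 == ((s.count m : Nat) : Int))).Nodup :=
    List.Nodup.filter _ (PySem.Set.nodup_ofList s)
  have hmemwin : ∀ c, c ∈ (PySem.Set.ofList s).filter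
      (fun c => (PySem.Dict.counter s).getD c 0 == ((s.count m : Nat) : Int)) ↔
      (c ∈ s ∧ s.count c = s.count m) := by
    intro c
    rw [List.mem_filter, PySem.Dict.getD_counter, PySem.Set.mem_ofList, beq_iff_eq]
    constructor
    · rintro ⟨h1, h2⟩; exact ⟨h1, by exact_mod_cast h2⟩
    · rintro ⟨h1, h2⟩; exact ⟨h1, by exact_mod_cast h2⟩
  have hperm := (List.perm_ext_iff_of_nodup hnodW hnodwin).mpr
    (fun c => (hmemW c).trans (hmemwin c).symm)
  exact (PySem.List.sorted_eq_of_perm_of_pairwise_lt _ _ _ hperm hpairW).symm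

theorem davi_eq (str : String) (hne : str.toList ≠ [])
    (hlow : ∀ c ∈ str.toList, ('a' ≤ c ∧ c ≤ 'z')) : davi str = davi_alt str := by
  have hmem : ∀ c ∈ str.toList, c ∈ aAlph := fun c hc => (mem_aAlph c).mpr (hlow c hc)
  exact congrArg String.mk (core str.toList hne hmem)

-- ===== VERDICT (by name: the statement is the Claim_ definition above) =====
theorem davi_spec : Claim_equal_davi := by
  intro str _ hp
  unfold Spec_davi
  exact davi_eq str hp.1 (by simpa using hp.2)

set_option maxRecDepth 4096 in
@[simp] theorem davi_raises : Claim_raises_davi := by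
  unfold Claim_raises_davi
  refine ⟨fun str _ hr hp => hr.2 hp.2, by decide, by decide, by rfl⟩
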